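-- pv_equiv track=rewrite | github.com/abc123-coding/2025algorithm | 0x08_stack_adv/2504.py | solution
-- ===== SOURCE A (Python) =====
-- def solution(ps):
--
--     total = 0 # 최종 반환 값
--     val = 1 # 괄호가 완성된 후 total에 더해줄 값
--     stack = []
--
--     for i in range(len(ps)):
--
--         if ps[i] == '(':
--             stack.append('(')
--             val *= 2
--
--         elif ps[i] == '[':
--             stack.append('[')
--             val *= 3
--
--         elif ps[i] == ')':
--
--             if stack and stack[-1] == '(':
--                 stack.pop()
--
--                 if ps[i-1] == '(' :
--                     total += val
--
--                 val //= 2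
--
--             else : # empty stack or [...)
--                 return 0
--
--         elif ps[i] == ']':
--
--             if stack and stack[-1] == '[':
--                 stack.pop()
--
--                 if ps[i-1] == '[':
--                     total += val
--
--                 val //= 3
--
--             else : # empty stack or (...]
--                 return 0
--
--     return total if not stack else 0
-- ===== SOURCE B (Python) =====
-- def solution(ps):
--     # Stack of partial results instead of a running multiplier: push opener
--     # markers; on a closer, pop and sum the values of the enclosed region and
--     # push base (for a textually empty pair) or base * inner sum.
--     stack = []  # int partial values and opener markers '(' / '['
--     prev = ''
--     for c in ps:
--         if c == '(' or c == '[':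
--             stack.append(c)
--         elif c == ')' or c == ']':
--             opener = '(' if c == ')' else '['
--             base = 2 if c == ')' else 3
--             inner = 0
--             while stack and isinstance(stack[-1], int):
--                 inner += stack.pop()
--             if not stack or stack[-1] != opener:
--                 return 0  # missing or mismatched opener
--             stack.pop()
--             stack.append(base if prev == opener else base * inner)
--         prev = c
--     total = 0
--     for x in reversed(stack):
--         if not isinstance(x, int):
--             return 0  # unclosed opener left over
--         total += x
--     return total
-- ===== Notes on version B (the rewrite author's own statement) =====
-- stated objective: faster
-- what changed: Replaces A's running multiplier maintained with *= and //= at every bracket (and its add-on-empty-pair accounting) by a stack of partial results: openers push a marker, a closer pops and sums the enclosed values and pushes base (textually empty pair) or base times the inner sum, the answer being the final sum of the value stack.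
import Mathlib
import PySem

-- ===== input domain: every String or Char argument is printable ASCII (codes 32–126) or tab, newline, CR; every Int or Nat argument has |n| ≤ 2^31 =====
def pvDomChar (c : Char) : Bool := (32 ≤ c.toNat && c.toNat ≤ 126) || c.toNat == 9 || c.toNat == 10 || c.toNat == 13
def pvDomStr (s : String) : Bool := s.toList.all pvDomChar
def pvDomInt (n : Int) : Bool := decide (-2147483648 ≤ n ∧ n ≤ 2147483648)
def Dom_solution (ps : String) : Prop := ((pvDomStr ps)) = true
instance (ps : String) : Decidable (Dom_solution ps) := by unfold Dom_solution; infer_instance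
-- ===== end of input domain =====

-- B replaces A's per-bracket *=/ //= running multiplier with a stack of partial
-- results; same value on every input (measured faster in a timing run).

-- ===== PORT A =====
-- A's for-loop over range(len(ps)) with state (total, val, stack) and early
-- `return 0`, as structural recursion returning `none` for the early return.
-- `ps[i-1]` is carried as `prev` (the branch reading it needs a nonempty stack,
-- hence i ≥ 1, so `prev` is exactly ps[i-1] there).
def solLoopA : List Char → Option Char → Int → Int → List Char → Option (Int × Int × List Char)
  | [], _, total, val, stack => some (total, val, stack)
  | c :: rest, prev, total, val, stack =>
    if c = '(' then
      solLoopA rest (some c) total (val * 2) ('(' :: stack)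
    else if c = '[' then
      solLoopA rest (some c) total (val * 3) ('[' :: stack)
    else if c = ')' then
      match stack with
      | '(' :: s =>
          solLoopA rest (some c) (if prev = some '(' then total + val else total)
            (PySem.Int.floordiv val 2) s
      | _ => none
    else if c = ']' then
      match stack with
      | '[' :: s =>
          solLoopA rest (some c) (if prev = some '[' then total + val else total)
            (PySem.Int.floordiv val 3) s
      | _ => none
    else
      solLoopA rest (some c) total val stack

def solution (ps : String) : Int :=
  match solLoopA ps.toList none 0 1 [] with
  | none => 0
  | some (total, _, stack) => if stack = [] then total else 0

-- ===== PORT B =====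
-- B's stack holds opener markers (Sum.inl) and int partial values (Sum.inr).

-- the inner `while stack and isinstance(stack[-1], int): inner += stack.pop()`
def popVals : List (Char ⊕ Int) → Int × List (Char ⊕ Int)
  | Sum.inr v :: t => let r := popVals t; (v + r.1, r.2)
  | st => (0, st)

def solLoopB : List Char → Option Char → List (Char ⊕ Int) → Option (List (Char ⊕ Int))
  | [], _, stack => some stack
  | c :: rest, prev, stack =>
    if c = '(' ∨ c = '[' then
      solLoopB rest (some c) (Sum.inl c :: stack)
    else if c = ')' ∨ c = ']' then
      let opener : Char := if c = ')' then '(' else '['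
      let base : Int := if c = ')' then 2 else 3
      let p := popVals stack
      match p.2 with
      | Sum.inl m :: s =>
          if m = opener then
            solLoopB rest (some c)
              (Sum.inr (if prev = some opener then base else base * p.1) :: s)
          else none
      | _ => none
    else
      solLoopB rest (some c) stack

-- the final `for x in reversed(stack)` pass (head of our list = top of stack)
def sumB : List (Char ⊕ Int) → Option Int
  | [] => some 0
  | Sum.inl _ :: _ => none
  | Sum.inr v :: t => (sumB t).map (v + ·)

def solution_alt (ps : String) : Int :=
  match solLoopB ps.toList none [] with
  | none => 0
  | some stack =>
    match sumB stack with
    | none => 0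
    | some t => t

-- ===== PRECONDITION & SPEC =====
def Spec_solution (ps : String) (out : Int) : Prop := out = solution_alt ps
instance (ps : String) (out : Int) : Decidable (Spec_solution ps out) := by unfold Spec_solution; infer_instance

-- ===== CLAIM (what is proved, stated in full; the proofs are below) =====
def Claim_equal_solution : Prop := ∀ (ps : String), Dom_solution ps → Spec_solution ps (solution ps)

-- ===== LEMMAS AND PROOFS =====

-- the opener markers of a B-stack, top first (= A's stack)
def marks : List (Char ⊕ Int) → List Char
  | [] => []
  | Sum.inl m :: t => m :: marks t
  | Sum.inr _ :: t => marks t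

-- product of base values of the open markers (= A's `val`)
def prodB : List Char → Int
  | [] => 1
  | m :: t => (if m = '(' then 2 else 3) * prodB t

-- value a B-stack contributes to the final answer once all markers close
def phi : List (Char ⊕ Int) → Int
  | [] => 0
  | Sum.inl _ :: t => phi t
  | Sum.inr v :: t => v * prodB (marks t) + phi t

lemma popVals_marks : ∀ bs, marks (popVals bs).2 = marks bs := by
  intro bs
  induction bs with
  | nil => simp [popVals, marks]
  | cons x t ih =>
    cases x with
    | inl m => simp [popVals, marks]
    | inr v => simp [popVals, marks, ih]

lemma popVals_phi : ∀ bs, phi bs = (popVals bs).1 * prodB (marks bs) + phi (popVals bs).2 := by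
  intro bs
  induction bs with
  | nil => simp [popVals, phi]
  | cons x t ih =>
    cases x with
    | inl m => simp [popVals, phi]
    | inr v =>
      simp only [popVals, phi, marks]
      rw [ih]; ring

lemma popVals_shape : ∀ bs, (popVals bs).2 = [] ∨ ∃ m t, (popVals bs).2 = Sum.inl m :: t := by
  intro bs
  induction bs with
  | nil => left; simp [popVals]
  | cons x t ih =>
    cases x with
    | inl m => right; exact ⟨m, t, by simp [popVals]⟩
    | inr v => simpa [popVals] using ih

lemma sumB_of_marks_nil : ∀ bs, marks bs = [] → sumB bs = some (phi bs) := by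
  intro bs
  induction bs with
  | nil => intro _; simp [sumB, phi]
  | cons x t ih =>
    cases x with
    | inl m => intro h; simp [marks] at h
    | inr v =>
      intro h
      simp only [marks] at h
      simp [sumB, phi, ih h, h, prodB]

lemma sumB_of_marks_ne : ∀ bs, marks bs ≠ [] → sumB bs = none := by
  intro bs
  induction bs with
  | nil => intro h; simp [marks] at h
  | cons x t ih =>
    cases x with
    | inl m => intro _; simp [sumB]
    | inr v =>
      intro h
      simp only [marks] at h
      simp [sumB, ih h]

lemma floordiv_cancel (b P : Int) (hb : b ≠ 0) (hb' : 0 < b) :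
    PySem.Int.floordiv (b * P) b = P := by
  rw [PySem.Int.floordiv_eq_ediv_of_pos hb']
  exact Int.mul_ediv_cancel_left P hb

-- main invariant: A's state (total, val, stack) is determined by B's stack
lemma loop_rel : ∀ (cs : List Char) (prev : Option Char) (t : Int) (bs : List (Char ⊕ Int)),
    (∀ o, prev = some o → (o = '(' ∨ o = '[') → ∃ bt, bs = Sum.inl o :: bt) →
    solLoopA cs prev (t + phi bs) (prodB (marks bs)) (marks bs)
      = (solLoopB cs prev bs).map (fun b => (t + phi b, prodB (marks b), marks b)) := by
  intro cs
  induction cs with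
  | nil => intro prev t bs _; simp [solLoopA, solLoopB]
  | cons c rest ih =>
    intro prev t bs hprev
    by_cases hop : c = '(' ∨ c = '['
    · -- opener: both push
      have hA : solLoopA (c :: rest) prev (t + phi bs) (prodB (marks bs)) (marks bs)
          = solLoopA rest (some c) (t + phi bs)
              (prodB (marks bs) * (if c = '(' then 2 else 3)) (c :: marks bs) := by
        rcases hop with h | h <;> subst h <;> simp [solLoopA]
      rw [hA]
      have hB : solLoopB (c :: rest) prev bs = solLoopB rest (some c) (Sum.inl c :: bs) := by
        simp [solLoopB, hop]
      rw [hB]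
      have h1 : phi (Sum.inl c :: bs) = phi bs := by simp [phi]
      have h2 : marks (Sum.inl c :: bs) = c :: marks bs := by simp [marks]
      have h3 : prodB (c :: marks bs) = (if c = '(' then 2 else 3) * prodB (marks bs) := by
        simp [prodB]
      have := ih (some c) t (Sum.inl c :: bs)
        (by intro o ho _; cases ho; exact ⟨bs, rfl⟩)
      rw [h1, h2, h3] at this
      rw [mul_comm] at this
      exact this
    · have hop' : c ≠ '(' ∧ c ≠ '[' := ⟨fun h => hop (Or.inl h), fun h => hop (Or.inr h)⟩
      by_cases hcl : c = ')' ∨ c = ']'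
      · -- closer: handle ')' and ']' separately with concrete literals
        have hmk := popVals_marks bs
        rcases hcl with h | h
        all_goals subst h
        -- c = ')'
        · rcases popVals_shape bs with hsh | ⟨m, s, hsh⟩
          · have hnil : marks bs = [] := by rw [← hmk, hsh]; rfl
            have hA : solLoopA (')' :: rest) prev (t + phi bs) (prodB (marks bs)) (marks bs) = none := by
              rw [hnil]; simp [solLoopA]
            have hB : solLoopB (')' :: rest) prev bs = none := by
              simp [solLoopB, hsh]
            rw [hA, hB]; rfl
          · have hms : marks bs = m :: marks s := by rw [← hmk, hsh]; rfl
            by_cases hm : m = '('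
            · subst hm
              set w : Int := if prev = some '(' then (2:Int) else 2 * (popVals bs).1 with hw
              have hB : solLoopB (')' :: rest) prev bs = solLoopB rest (some ')') (Sum.inr w :: s) := by
                simp [solLoopB, hsh, hw]
              have hA : solLoopA (')' :: rest) prev (t + phi bs) (prodB (marks bs)) (marks bs)
                  = solLoopA rest (some ')')
                      (if prev = some '(' then t + phi bs + prodB (marks bs) else t + phi bs)
                      (PySem.Int.floordiv (prodB (marks bs)) 2) (marks s) := by
                rw [hms]; simp [solLoopA]
              have hpv : prodB (marks bs) = 2 * prodB (marks s) := by
                rw [hms]; simp [prodB]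
              have hfd : PySem.Int.floordiv (prodB (marks bs)) 2 = prodB (marks s) := by
                rw [hpv]; exact floordiv_cancel 2 _ (by norm_num) (by norm_num)
              have htot : (if prev = some '(' then t + phi bs + prodB (marks bs) else t + phi bs)
                  = t + phi (Sum.inr w :: s) := by
                by_cases hp : prev = some '('
                · obtain ⟨bt, hbt⟩ := hprev '(' hp (Or.inl rfl)
                  have hpop : popVals bs = (0, bs) := by rw [hbt]; rfl
                  have hs : s = bt := by
                    rw [hpop, hbt] at hsh
                    injection hsh with _ h2; exact h2.symm
                  have hphibs : phi bs = phi s := by rw [hbt, hs]; simp [phi]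
                  rw [if_pos hp, hw, if_pos hp, hphibs, hpv]
                  simp [phi]; ring
                · rw [if_neg hp, hw, if_neg hp]
                  have hpp := popVals_phi bs
                  rw [hsh] at hpp
                  have hphis : phi (Sum.inl '(' :: s) = phi s := by simp [phi]
                  rw [hphis] at hpp
                  rw [hpp, hpv]
                  simp [phi]; ring
              rw [hA, hB, hfd, htot]
              have hmks : marks (Sum.inr w :: s) = marks s := by simp [marks]
              have := ih (some ')') t (Sum.inr w :: s)
                (by intro o ho hoo; cases ho; rcases hoo with h' | h' <;> exact absurd h' (by decide))
              rw [hmks] at this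
              exact this
            · have hA : solLoopA (')' :: rest) prev (t + phi bs) (prodB (marks bs)) (marks bs) = none := by
                rw [hms]
                rcases em (m = '[') with hq | hq
                · subst hq; simp [solLoopA]
                · simp [solLoopA, hm, hq]
              have hB : solLoopB (')' :: rest) prev bs = none := by
                simp [solLoopB, hsh, hm]
              rw [hA, hB]; rfl
        -- c = ']'
        · rcases popVals_shape bs with hsh | ⟨m, s, hsh⟩
          · have hnil : marks bs = [] := by rw [← hmk, hsh]; rfl
            have hA : solLoopA (']' :: rest) prev (t + phi bs) (prodB (marks bs)) (marks bs) = none := by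
              rw [hnil]; simp [solLoopA]
            have hB : solLoopB (']' :: rest) prev bs = none := by
              simp [solLoopB, hsh]
            rw [hA, hB]; rfl
          · have hms : marks bs = m :: marks s := by rw [← hmk, hsh]; rfl
            by_cases hm : m = '['
            · subst hm
              set w : Int := if prev = some '[' then (3:Int) else 3 * (popVals bs).1 with hw
              have hB : solLoopB (']' :: rest) prev bs = solLoopB rest (some ']') (Sum.inr w :: s) := by
                simp [solLoopB, hsh, hw]
              have hA : solLoopA (']' :: rest) prev (t + phi bs) (prodB (marks bs)) (marks bs)
                  = solLoopA rest (some ']')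
                      (if prev = some '[' then t + phi bs + prodB (marks bs) else t + phi bs)
                      (PySem.Int.floordiv (prodB (marks bs)) 3) (marks s) := by
                rw [hms]; simp [solLoopA]
              have hpv : prodB (marks bs) = 3 * prodB (marks s) := by
                rw [hms]; simp [prodB]
              have hfd : PySem.Int.floordiv (prodB (marks bs)) 3 = prodB (marks s) := by
                rw [hpv]; exact floordiv_cancel 3 _ (by norm_num) (by norm_num)
              have htot : (if prev = some '[' then t + phi bs + prodB (marks bs) else t + phi bs)
                  = t + phi (Sum.inr w :: s) := by
                by_cases hp : prev = some '['
                · obtain ⟨bt, hbt⟩ := hprev '[' hp (Or.inr rfl)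
                  have hpop : popVals bs = (0, bs) := by rw [hbt]; rfl
                  have hs : s = bt := by
                    rw [hpop, hbt] at hsh
                    injection hsh with _ h2; exact h2.symm
                  have hphibs : phi bs = phi s := by rw [hbt, hs]; simp [phi]
                  rw [if_pos hp, hw, if_pos hp, hphibs, hpv]
                  simp [phi]; ring
                · rw [if_neg hp, hw, if_neg hp]
                  have hpp := popVals_phi bs
                  rw [hsh] at hpp
                  have hphis : phi (Sum.inl '[' :: s) = phi s := by simp [phi]
                  rw [hphis] at hpp
                  rw [hpp, hpv]
                  simp [phi]; ring
              rw [hA, hB, hfd, htot]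
              have hmks : marks (Sum.inr w :: s) = marks s := by simp [marks]
              have := ih (some ']') t (Sum.inr w :: s)
                (by intro o ho hoo; cases ho; rcases hoo with h' | h' <;> exact absurd h' (by decide))
              rw [hmks] at this
              exact this
            · have hA : solLoopA (']' :: rest) prev (t + phi bs) (prodB (marks bs)) (marks bs) = none := by
                rw [hms]
                rcases em (m = '(') with hq | hq
                · subst hq; simp [solLoopA]
                · simp [solLoopA, hm, hq]
              have hB : solLoopB (']' :: rest) prev bs = none := by
                simp [solLoopB, hsh, hm]
              rw [hA, hB]; rfl
      · -- other character: state unchanged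
        have hcl' : c ≠ ')' ∧ c ≠ ']' := ⟨fun h => hcl (Or.inl h), fun h => hcl (Or.inr h)⟩
        have hA : solLoopA (c :: rest) prev (t + phi bs) (prodB (marks bs)) (marks bs)
            = solLoopA rest (some c) (t + phi bs) (prodB (marks bs)) (marks bs) := by
          simp [solLoopA, hop'.1, hop'.2, hcl'.1, hcl'.2]
        have hB : solLoopB (c :: rest) prev bs = solLoopB rest (some c) bs := by
          simp [solLoopB, hop'.1, hop'.2, hcl'.1, hcl'.2]
        rw [hA, hB]
        exact ih (some c) t bs
          (by intro o ho hoo; cases ho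
              rcases hoo with h | h <;> exact absurd h (by first | exact hop'.1 | exact hop'.2))

-- ===== VERDICT (by name: the statement is the Claim_ definition above) =====
theorem solution_spec : Claim_equal_solution := by
  unfold Claim_equal_solution
  intro ps _
  unfold Spec_solution solution solution_alt
  have h := loop_rel ps.toList none 0 [] (by intro o ho _; cases ho)
  have h0 : phi ([] : List (Char ⊕ Int)) = 0 := rfl
  have h1 : marks ([] : List (Char ⊕ Int)) = [] := rfl
  have h2 : prodB [] = 1 := rfl
  rw [h0, h1, h2, add_zero] at h
  rw [h]
  cases hB : solLoopB ps.toList none [] with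
  | none => rfl
  | some bstack =>
    simp only [Option.map_some]
    by_cases hmk : marks bstack = []
    · rw [if_pos hmk, sumB_of_marks_nil bstack hmk, zero_add]
    · rw [if_neg hmk, sumB_of_marks_ne bstack hmk]
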